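-- pv_equiv track=rewrite | github.com/wabain/rstarc | test/test-runner.py | expand_toml_string
-- ===== SOURCE A (Python) =====
-- def expand_toml_string(key: str, string: str) -> str:
--     """hack: rewrite string literals into multiline form
--
--     The rtoml library outputs single-line literals, but we want multiline
--     string literals for readability.
--     """
--     chars = iter(string)
--
--     multiline = []
--
--     while True:
--         next_char = next(chars, None)
--
--         if next_char is None:
--             break
--
--         if next_char != '\\':
--             multiline.append(next_char)
--             continue
--
--         escaped = next(chars, None)
--         if escaped is None:
--             raise RuntimeError(f'unexpected EOF when modifying TOML key {key}')
--
--         if escaped == 'n':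
--             multiline.append('\n')
--         elif escaped == '"':
--             multiline.append('"')
--         else:
--             multiline.extend(['\\', escaped])
--
--     # Still need to escape three consecutive `"`s
--     return ''.join(multiline).replace('"""', '\\"\\"\\"')
-- ===== SOURCE B (Python) =====
-- def expand_toml_string(key: str, string: str) -> str:
--     """hack: rewrite string literals into multiline form (split/join version)"""
--     pieces = []
--     for piece in string.split('\\\\'):
--         subs = piece.split('\\')
--         out = [subs[0]]
--         for sub in subs[1:]:
--             if sub == '':
--                 raise RuntimeError(f'unexpected EOF when modifying TOML key {key}')
--             if sub[0] == 'n':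
--                 out.append('\n' + sub[1:])
--             elif sub[0] == '"':
--                 out.append('"' + sub[1:])
--             else:
--                 out.append('\\' + sub)
--         pieces.append(''.join(out))
--     return '\\\\'.join(pieces).replace('"""', '\\"\\"\\"')
-- ===== Notes on version B (the rewrite author's own statement) =====
-- stated objective: faster
-- what changed: Replaces the manual per-character iterator state machine (next() two at a time with a branch per escape) by C-level string splitting: split on '\\\\' to isolate literal double backslashes, split each piece on '\\' and rewrite each escape's first character, then join everything back.
-- outside the precondition, e.g. on expand_toml_string('k', 'a\\'): A raises RuntimeError, B raises RuntimeError
import Mathlib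
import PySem

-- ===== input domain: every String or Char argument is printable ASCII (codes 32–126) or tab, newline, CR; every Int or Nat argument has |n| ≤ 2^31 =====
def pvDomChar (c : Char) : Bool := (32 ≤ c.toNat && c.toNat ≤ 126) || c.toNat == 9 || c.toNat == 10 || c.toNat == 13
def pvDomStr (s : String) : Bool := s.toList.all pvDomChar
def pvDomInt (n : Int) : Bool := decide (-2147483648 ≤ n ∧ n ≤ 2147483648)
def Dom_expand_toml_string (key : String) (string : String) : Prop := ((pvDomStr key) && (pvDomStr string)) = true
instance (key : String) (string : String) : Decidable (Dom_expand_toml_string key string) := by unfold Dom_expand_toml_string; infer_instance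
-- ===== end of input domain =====

-- B replaces A's char-by-char escape state machine by split on '\\\\' / split on '\\' with per-escape substitution and a join (measurably faster in Python via C-level split/join).

-- ===== PORT A =====
-- the while/iterator loop of A as structural recursion over the character list;
-- the branch where Python raises RuntimeError (dangling backslash, excluded by Pre_) returns the accumulated output
def pvScanA : List Char → List Char
  | [] => []
  | c :: rest =>
    if c ≠ '\\' then c :: pvScanA rest
    else
      match rest with
      | [] => []  -- Python: raise RuntimeError (outside Pre_)
      | e :: rest' =>
        if e = 'n' then '\n' :: pvScanA rest'
        else if e = '"' then '"' :: pvScanA rest'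
        else '\\' :: e :: pvScanA rest'

def expand_toml_string (key : String) (string : String) : String :=
  PySem.Str.replace (String.ofList (pvScanA string.toList)) "\"\"\"" "\\\"\\\"\\\""

-- ===== PORT B =====
-- one escape's replacement: sub is the text following a single backslash; [] is the dangling-backslash case
-- where Python B raises RuntimeError (outside Pre_)
def pvEscSub (sub : List Char) : List Char :=
  match sub with
  | [] => []  -- Python: raise RuntimeError (outside Pre_)
  | c :: rest =>
    if c = 'n' then '\n' :: rest
    else if c = '"' then '"' :: rest
    else '\\' :: c :: rest

-- piece.split('\\'); out = [subs[0]] + replacements; ''.join(out)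
def pvProcPiece (piece : List Char) : List Char :=
  match PySem.Chars.splitOn piece ['\\'] with
  | [] => []  -- unreachable: Python split never returns an empty list
  | s0 :: subs => PySem.Chars.join [] (s0 :: subs.map pvEscSub)

def expand_toml_string_alt (key : String) (string : String) : String :=
  PySem.Str.replace
    (String.ofList (PySem.Chars.join ['\\', '\\']
      ((PySem.Chars.splitOn string.toList ['\\', '\\']).map pvProcPiece)))
    "\"\"\"" "\\\"\\\"\\\""

-- ===== PRECONDITION & SPEC =====
-- Pre_ excludes exactly the strings ending in an odd run of backslashes: there the escape scan hits EOF
-- mid-escape and Python A (and Python B alike) raises RuntimeError.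
def Pre_expand_toml_string (key : String) (string : String) : Prop :=
  (string.toList.reverse.takeWhile (· = '\\')).length % 2 = 0
instance (key : String) (string : String) : Decidable (Pre_expand_toml_string key string) := by
  unfold Pre_expand_toml_string; infer_instance

def pvWitness_expand_toml_string : String × String := ("k", "a\\nb\\\"c\\\\d")

def Spec_expand_toml_string (key : String) (string : String) (out : String) : Prop :=
  out = expand_toml_string_alt key string
instance (key : String) (string : String) (out : String) : Decidable (Spec_expand_toml_string key string out) := by
  unfold Spec_expand_toml_string; infer_instance

-- ===== CLAIM (what is proved, stated in full; the proofs are below) =====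
def Claim_equal_expand_toml_string : Prop := ∀ (key : String) (string : String), Dom_expand_toml_string key string → Pre_expand_toml_string key string → Spec_expand_toml_string key string (expand_toml_string key string)

-- ===== LEMMAS AND PROOFS =====

theorem pvGo_char (sep : List Char) (hsep : sep ≠ []) :
    ∀ (n : Nat) (l : List Char) (fuel : Nat) (cur : List Char) (acc : List (List Char)),
      l.length ≤ n → l.length < fuel →
      ∃ h t, PySem.Chars.splitOn l sep = h :: t ∧
        PySem.Chars.splitOn.go sep fuel l cur acc = acc.reverse ++ (cur.reverse ++ h) :: t := by
  intro n
  induction n with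
  | zero =>
    intro l fuel cur acc hn hf
    have hl : l = [] := by cases l <;> simp_all
    subst hl
    obtain ⟨f, rfl⟩ : ∃ f, fuel = f + 1 := ⟨fuel - 1, by omega⟩
    exact ⟨[], [], by simp [PySem.Chars.splitOn, PySem.Chars.splitOn.go],
      by simp [PySem.Chars.splitOn.go]⟩
  | succ n ih =>
    intro l fuel cur acc hn hf
    obtain ⟨f, rfl⟩ : ∃ f, fuel = f + 1 := ⟨fuel - 1, by omega⟩
    cases l with
    | nil =>
      exact ⟨[], [], by simp [PySem.Chars.splitOn, PySem.Chars.splitOn.go],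
        by simp [PySem.Chars.splitOn.go]⟩
    | cons c rest =>
      have hsl : 1 ≤ sep.length := by cases sep <;> simp_all
      simp only [List.length_cons] at hn hf
      have hd : ((c :: rest).drop sep.length).length ≤ rest.length := by
        simp [List.length_drop]; omega
      by_cases h : sep.isPrefixOf (c :: rest)
      · obtain ⟨h1, t1, e1, g1⟩ :=
          ih ((c :: rest).drop sep.length) f [] (cur.reverse :: acc) (by omega) (by omega)
        obtain ⟨h2, t2, e2, g2⟩ :=
          ih ((c :: rest).drop sep.length) (rest.length + 1) [] [[]] (by omega) (by omega)
        rw [e1] at e2; injection e2 with eh et; subst eh; subst et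
        refine ⟨[], h1 :: t1, ?_, ?_⟩
        · rw [PySem.Chars.splitOn]
          simp only [List.length_cons]
          rw [PySem.Chars.splitOn.go]; simp only [h, if_pos]
          simp only [List.reverse_nil]
          rw [g2]; simp
        · rw [PySem.Chars.splitOn.go]; simp only [h, if_pos]
          rw [g1]; simp
      · obtain ⟨h1, t1, e1, g1⟩ := ih rest f (c :: cur) acc (by omega) (by omega)
        obtain ⟨h2, t2, e2, g2⟩ := ih rest (rest.length + 1) [c] [] (by omega) (by omega)
        rw [e1] at e2; injection e2 with eh et; subst eh; subst et
        refine ⟨c :: h1, t1, ?_, ?_⟩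
        · rw [PySem.Chars.splitOn]
          simp only [List.length_cons]
          rw [PySem.Chars.splitOn.go]; simp only [h]
          simp only [List.reverse_nil]
          rw [g2]; simp
        · rw [PySem.Chars.splitOn.go]; simp only [h]
          rw [g1]; simp

theorem pvSp_shape (sep : List Char) (hsep : sep ≠ []) (l : List Char) :
    ∃ h t, PySem.Chars.splitOn l sep = h :: t := by
  obtain ⟨h, t, e, -⟩ := pvGo_char sep hsep l.length l (l.length + 1) [] []
    (Nat.le_refl _) (Nat.lt_succ_self _)
  exact ⟨h, t, e⟩

theorem pvSp_prefix (sep : List Char) (hsep : sep ≠ []) (c : Char) (rest : List Char)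
    (h : sep.isPrefixOf (c :: rest)) :
    PySem.Chars.splitOn (c :: rest) sep =
      [] :: PySem.Chars.splitOn ((c :: rest).drop sep.length) sep := by
  have hd : ((c :: rest).drop sep.length).length ≤ rest.length := by
    have : 1 ≤ sep.length := by cases sep <;> simp_all
    simp [List.length_drop]; omega
  obtain ⟨h1, t1, e1, g1⟩ := pvGo_char sep hsep rest.length ((c :: rest).drop sep.length)
    (rest.length + 1) [] [[]] (by omega) (by omega)
  rw [PySem.Chars.splitOn]
  simp only [List.length_cons]
  rw [PySem.Chars.splitOn.go]; simp only [h, if_pos, List.reverse_nil]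
  rw [g1, e1]; simp

theorem pvSp_cons (sep : List Char) (hsep : sep ≠ []) (c : Char) (rest : List Char)
    (h : ¬ sep.isPrefixOf (c :: rest)) :
    ∃ h1 t1, PySem.Chars.splitOn rest sep = h1 :: t1 ∧
      PySem.Chars.splitOn (c :: rest) sep = (c :: h1) :: t1 := by
  obtain ⟨h1, t1, e1, g1⟩ := pvGo_char sep hsep rest.length rest
    (rest.length + 1) [c] [] (by omega) (by omega)
  refine ⟨h1, t1, e1, ?_⟩
  rw [PySem.Chars.splitOn]
  simp only [List.length_cons]
  rw [PySem.Chars.splitOn.go]; simp only [h]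
  rw [g1]; simp

theorem pvJoin0_cons (x : List Char) (xs : List (List Char)) :
    PySem.Chars.join [] (x :: xs) = x ++ PySem.Chars.join [] xs := by
  cases xs <;> simp [PySem.Chars.join, List.intercalate]

theorem pvJoin_prepend (sep a x : List Char) (xs : List (List Char)) :
    PySem.Chars.join sep ((a ++ x) :: xs) = a ++ PySem.Chars.join sep (x :: xs) := by
  cases xs <;> simp [PySem.Chars.join, List.intercalate]

def pvBfun (cs : List Char) : List Char :=
  PySem.Chars.join ['\\', '\\'] ((PySem.Chars.splitOn cs ['\\', '\\']).map pvProcPiece)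

theorem pvProc_cons (c : Char) (p : List Char) (hc : c ≠ '\\') :
    pvProcPiece (c :: p) = c :: pvProcPiece p := by
  have hnp : ¬ (['\\'] : List Char).isPrefixOf (c :: p) := by
    simp [List.isPrefixOf]; exact fun e => absurd e.symm hc
  obtain ⟨h1, t1, e1, e2⟩ := pvSp_cons ['\\'] (by simp) c p hnp
  have L : pvProcPiece (c :: p) =
      PySem.Chars.join [] ((c :: h1) :: t1.map pvEscSub) := by
    unfold pvProcPiece; rw [e2]
  have R : pvProcPiece p = PySem.Chars.join [] (h1 :: t1.map pvEscSub) := by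
    unfold pvProcPiece; rw [e1]
  rw [L, R, show (c :: h1) = [c] ++ h1 from rfl, pvJoin_prepend]
  simp

theorem pvProc_esc (e : Char) (p : List Char) (he : e ≠ '\\') :
    pvProcPiece ('\\' :: e :: p) = pvEscSub (e :: pvProcPiece p) := by
  have hp : (['\\'] : List Char).isPrefixOf ('\\' :: e :: p) := by simp [List.isPrefixOf]
  have hnp : ¬ (['\\'] : List Char).isPrefixOf (e :: p) := by
    simp [List.isPrefixOf]; exact fun x => absurd x.symm he
  obtain ⟨h1, t1, e1, e2⟩ := pvSp_cons ['\\'] (by simp) e p hnp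
  have hsp : PySem.Chars.splitOn ('\\' :: e :: p) ['\\'] = [] :: (e :: h1) :: t1 := by
    rw [pvSp_prefix ['\\'] (by simp) '\\' (e :: p) hp]
    simp only [List.length_cons, List.length_nil, List.drop_succ_cons, List.drop_zero]
    rw [e2]
  have L : pvProcPiece ('\\' :: e :: p) =
      PySem.Chars.join [] ([] :: pvEscSub (e :: h1) :: t1.map pvEscSub) := by
    unfold pvProcPiece; rw [hsp]; simp [List.map_cons]
  have R : pvProcPiece p = PySem.Chars.join [] (h1 :: t1.map pvEscSub) := by
    unfold pvProcPiece; rw [e1]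
  rw [L, R, pvJoin0_cons, pvJoin0_cons, pvJoin0_cons]
  simp only [pvEscSub]
  split_ifs <;> simp

theorem pvBfun_cons (c : Char) (rest : List Char) (hc : c ≠ '\\') :
    pvBfun (c :: rest) = c :: pvBfun rest := by
  have hnp : ¬ (['\\', '\\'] : List Char).isPrefixOf (c :: rest) := by
    simp [List.isPrefixOf]; exact fun e => absurd e.symm hc
  obtain ⟨h1, t1, e1, e2⟩ := pvSp_cons ['\\', '\\'] (by simp) c rest hnp
  unfold pvBfun
  rw [e2, e1, List.map_cons, List.map_cons, pvProc_cons c h1 hc,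
    show (c :: pvProcPiece h1) = [c] ++ pvProcPiece h1 from rfl, pvJoin_prepend]
  rfl

theorem pvBfun_esc (e : Char) (rest : List Char) (he : e ≠ '\\') :
    pvBfun ('\\' :: e :: rest) = pvEscSub (e :: pvBfun rest) := by
  have hnp1 : ¬ (['\\', '\\'] : List Char).isPrefixOf ('\\' :: e :: rest) := by
    simp [List.isPrefixOf]; exact fun x => absurd x.symm he
  have hnp2 : ¬ (['\\', '\\'] : List Char).isPrefixOf (e :: rest) := by
    simp [List.isPrefixOf]; exact fun x => absurd x.symm he
  obtain ⟨h2, t2, e3, e4⟩ := pvSp_cons ['\\', '\\'] (by simp) e rest hnp2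
  obtain ⟨h1, t1, e1, e2⟩ := pvSp_cons ['\\', '\\'] (by simp) '\\' (e :: rest) hnp1
  rw [e4] at e1; injection e1 with eh et; subst eh; subst et
  unfold pvBfun
  rw [e2, e3, List.map_cons, List.map_cons, pvProc_esc e h2 he]
  simp only [pvEscSub]
  split_ifs
  · rw [show ('\n' :: pvProcPiece h2) = ['\n'] ++ pvProcPiece h2 from rfl, pvJoin_prepend]; rfl
  · rw [show ('"' :: pvProcPiece h2) = ['"'] ++ pvProcPiece h2 from rfl, pvJoin_prepend]; rfl
  · rw [show ('\\' :: e :: pvProcPiece h2) = ['\\', e] ++ pvProcPiece h2 from rfl, pvJoin_prepend]; rfl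

theorem pvBfun_bsbs (rest : List Char) :
    pvBfun ('\\' :: '\\' :: rest) = '\\' :: '\\' :: pvBfun rest := by
  have hp : (['\\', '\\'] : List Char).isPrefixOf ('\\' :: '\\' :: rest) := by
    simp [List.isPrefixOf]
  obtain ⟨h1, t1, e1⟩ := pvSp_shape ['\\', '\\'] (by simp) rest
  unfold pvBfun
  rw [pvSp_prefix ['\\', '\\'] (by simp) '\\' ('\\' :: rest) hp]
  simp only [List.length_cons, List.length_nil, List.drop_succ_cons, List.drop_zero]
  rw [e1, List.map_cons, List.map_cons,
    show pvProcPiece [] = [] from rfl, PySem.Chars.join_cons_cons]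
  rfl

theorem pvScanA_cons (c : Char) (rest : List Char) (hc : c ≠ '\\') :
    pvScanA (c :: rest) = c :: pvScanA rest := by
  conv_lhs => rw [pvScanA.eq_def]
  simp [hc]

theorem pvScanA_esc (e : Char) (rest : List Char) :
    pvScanA ('\\' :: e :: rest) = pvEscSub (e :: pvScanA rest) := by
  conv_lhs => rw [pvScanA.eq_def]
  simp only [pvEscSub]
  split_ifs <;> simp_all

theorem pvMain (cs : List Char) : pvBfun cs = pvScanA cs := by
  induction cs using pvScanA.induct with
  | case1 => decide
  | case2 c rest hc ih =>
    rw [pvBfun_cons c rest hc, ih, pvScanA_cons c rest hc]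
  | case3 x hc =>
    have : x = '\\' := by by_contra hx; exact hc hx
    subst this; decide
  | case4 a b c d =>
    have ha : a = '\\' := by by_contra hx; exact b hx
    subst ha
    rw [pvBfun_esc 'n' c (by decide), d, pvScanA_esc]
  | case5 a b c d e =>
    have ha : a = '\\' := by by_contra hx; exact b hx
    subst ha
    rw [pvBfun_esc '"' c (by decide), e, pvScanA_esc]
  | case6 a b c d e f ih =>
    have ha : a = '\\' := by by_contra hx; exact b hx
    subst ha
    rw [pvScanA_esc]
    by_cases hcb : c = '\\'
    · subst hcb
      rw [pvBfun_bsbs d, ih]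
      simp [pvEscSub]
    · rw [pvBfun_esc c d hcb, ih]

-- ===== VERDICT (by name: the statement is the Claim_ definition above) =====
theorem expand_toml_string_spec : Claim_equal_expand_toml_string := by
  intro key string _ _
  unfold Spec_expand_toml_string expand_toml_string expand_toml_string_alt
  rw [← pvMain string.toList]
  rfl
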